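-- pv_equiv track=rewrite | github.com/Saaannnn/algyprog | main.py | recorrido_diagonal_secundaria_inferior
-- ===== SOURCE A (Python) =====
-- def recorrido_diagonal_secundaria_inferior(filas, columnas):
--     """Genera coordenadas para el recorrido de la diagonal secundaria inferior."""
--     ruta = []
--     for suma_fc in range(columnas - 1, filas + columnas - 1):
--         for f in range(filas):
--             c = suma_fc - f
--             if 0 <= c < columnas:
--                 ruta.append((f, c))
--     return ruta
-- ===== SOURCE B (Python) =====
-- def recorrido_diagonal_secundaria_inferior(filas, columnas):
--     """Genera coordenadas para el recorrido de la diagonal secundaria inferior."""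
--     celdas = [(f, c)
--               for f in range(filas)
--               for c in range(max(0, columnas - 1 - f), columnas)]
--     return sorted(celdas, key=lambda p: (p[0] + p[1], p[0]))
-- ===== Notes on version B (the rewrite author's own statement) =====
-- stated objective: alternative
-- what changed: B generates the lower-secondary triangular region row by row (row-major) and then stable-sorts the cells by the key (row+column, row), instead of A's diagonal-major double loop that scans every row for each diagonal and filters by a column bound.
import Mathlib
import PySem

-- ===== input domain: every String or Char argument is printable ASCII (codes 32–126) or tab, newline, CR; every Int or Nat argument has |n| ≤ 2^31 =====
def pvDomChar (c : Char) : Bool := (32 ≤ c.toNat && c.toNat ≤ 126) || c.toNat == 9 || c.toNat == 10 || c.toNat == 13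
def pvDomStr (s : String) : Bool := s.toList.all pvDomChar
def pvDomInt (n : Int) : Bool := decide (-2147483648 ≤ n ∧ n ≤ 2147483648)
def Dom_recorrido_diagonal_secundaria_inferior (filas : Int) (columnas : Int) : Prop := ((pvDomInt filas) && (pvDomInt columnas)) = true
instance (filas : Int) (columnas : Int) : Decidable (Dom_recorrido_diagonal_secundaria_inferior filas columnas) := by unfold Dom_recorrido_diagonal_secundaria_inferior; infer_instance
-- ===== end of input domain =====

-- B generates the lower-secondary triangular region row by row and then sorts the cells
-- by (anti-diagonal index, row) — sort-then-scan instead of A's per-diagonal scan over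
-- all rows (objective: alternative algorithm; no speed claim).

-- ===== PORT A =====
def recorrido_diagonal_secundaria_inferior (filas : Int) (columnas : Int) : List (Int × Int) :=
  (PySem.List.pyRange (columnas - 1) (filas + columnas - 1) 1).foldl
    (fun ruta suma_fc =>
      (PySem.List.pyRange 0 filas 1).foldl
        (fun ruta f =>
          let c := suma_fc - f
          if 0 ≤ c ∧ c < columnas then ruta ++ [(f, c)] else ruta)
        ruta)
    []

-- ===== PORT B =====
def recorrido_diagonal_secundaria_inferior_alt (filas : Int) (columnas : Int) : List (Int × Int) :=
  let celdas :=
    (PySem.List.pyRange 0 filas 1).flatMap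
      (fun f =>
        (PySem.List.pyRange (max 0 (columnas - 1 - f)) columnas 1).map (fun c => (f, c)))
  PySem.List.sorted2 celdas (fun p => p.1 + p.2) (fun p => p.1) false

-- ===== PRECONDITION & SPEC =====
def Spec_recorrido_diagonal_secundaria_inferior (filas : Int) (columnas : Int) (out : List (Int × Int)) : Prop := out = recorrido_diagonal_secundaria_inferior_alt filas columnas
instance (filas : Int) (columnas : Int) (out : List (Int × Int)) : Decidable (Spec_recorrido_diagonal_secundaria_inferior filas columnas out) := by unfold Spec_recorrido_diagonal_secundaria_inferior; infer_instance

-- ===== CLAIM (what is proved, stated in full; the proofs are below) =====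
def Claim_equal_recorrido_diagonal_secundaria_inferior : Prop := ∀ (filas : Int) (columnas : Int), Dom_recorrido_diagonal_secundaria_inferior filas columnas → Spec_recorrido_diagonal_secundaria_inferior filas columnas (recorrido_diagonal_secundaria_inferior filas columnas)

-- ===== LEMMAS AND PROOFS =====

/-- The diagonal-major list of coordinates (A's output, in closed interval form). -/
def pvDiag (filas columnas s : Int) : List (Int × Int) :=
  (PySem.List.pyRange (max 0 (s - columnas + 1)) (min filas (s + 1)) 1).map (fun f => (f, s - f))

def pvTarget (filas columnas : Int) : List (Int × Int) :=
  (PySem.List.pyRange (columnas - 1) (filas + columnas - 1) 1).flatMap (pvDiag filas columnas)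

/-- B's row-major cell list. -/
def pvCells (filas columnas : Int) : List (Int × Int) :=
  (PySem.List.pyRange 0 filas 1).flatMap
    (fun f => (PySem.List.pyRange (max 0 (columnas - 1 - f)) columnas 1).map (fun c => (f, c)))

/-- Integer key strictly increasing in (p.1 + p.2, p.1) as long as 0 ≤ p.1 < M. -/
def pvKey (M : Int) (p : Int × Int) : Int := (p.1 + p.2) * M + p.1

/-- Key for the row-major order, strictly increasing in (p.1, p.2) as long as 0 ≤ p.2 < M. -/
def pvKeyRow (M : Int) (p : Int × Int) : Int := p.1 * M + p.2

theorem pv_base_lt_iff (M s1 f1 s2 f2 : Int) (hM : 0 < M)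
    (h1 : 0 ≤ f1) (h1' : f1 < M) (h2 : 0 ≤ f2) (h2' : f2 < M) :
    s1 * M + f1 < s2 * M + f2 ↔ (s1 < s2 ∨ (s1 = s2 ∧ f1 < f2)) := by
  constructor
  · intro h
    rcases lt_trichotomy s1 s2 with hs | hs | hs
    · exact Or.inl hs
    · subst hs; exact Or.inr ⟨rfl, by omega⟩
    · exfalso
      have : (s2 + 1) * M ≤ s1 * M := by
        exact mul_le_mul_of_nonneg_right (by omega) hM.le
      nlinarith
  · rintro (hs | ⟨hs, hf⟩)
    · have : (s1 + 1) * M ≤ s2 * M := mul_le_mul_of_nonneg_right (by omega) hM.le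
      nlinarith
    · subst hs; omega

/-- Filtering an int range by an interval predicate is the clamped range. -/
theorem filter_pyRange_interval (lo hi : Int) :
    ∀ (n : Nat) (a b : Int), (b - a).toNat = n →
      (PySem.List.pyRange a b 1).filter (fun x => decide (lo ≤ x ∧ x < hi))
        = PySem.List.pyRange (max a lo) (min b hi) 1 := by
  intro n
  induction n with
  | zero =>
      intro a b h
      have hba : b ≤ a := by omega
      rw [PySem.List.pyRange_one_eq_nil hba, PySem.List.pyRange_one_eq_nil (by omega : min b hi ≤ max a lo)]
      rfl
  | succ n ih =>
      intro a b h
      have hab : a < b := by omega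
      rw [PySem.List.pyRange_one_cons hab]
      have ih' := ih (a + 1) b (by omega)
      by_cases hp : lo ≤ a ∧ a < hi
      · have h1 : max a lo = a := by omega
        have h2 : max (a + 1) lo = a + 1 := by omega
        have h3 : a < min b hi := by omega
        simp only [List.filter_cons, decide_eq_true_eq, if_pos hp, ih', h2, h1,
          PySem.List.pyRange_one_cons h3]
      · have h2 : max (a + 1) lo = max a lo ∨ (min b hi ≤ max a lo ∧ min b hi ≤ max (a+1) lo) := by omega
        simp only [List.filter_cons, decide_eq_true_eq, if_neg hp, ih']
        rcases h2 with h2 | ⟨h2, h3⟩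
        · rw [h2]
        · rw [PySem.List.pyRange_one_eq_nil h3, PySem.List.pyRange_one_eq_nil h2]

theorem inner_loop_eq (filas columnas s : Int) (ruta : List (Int × Int)) :
    (PySem.List.pyRange 0 filas 1).foldl
        (fun ruta f =>
          let c := s - f
          if 0 ≤ c ∧ c < columnas then ruta ++ [(f, c)] else ruta) ruta
      = ruta ++ pvDiag filas columnas s := by
  simp only [pvDiag]
  rw [PySem.List.foldl_append_ite (fun f => 0 ≤ s - f ∧ s - f < columnas) (fun f => (f, s - f))]
  congr 1
  rw [List.filter_congr (q := fun x => decide (s - columnas + 1 ≤ x ∧ x < s + 1))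
      (by intro x _; simp only [decide_eq_decide]; omega)]
  rw [filter_pyRange_interval (s - columnas + 1) (s + 1) (filas - 0).toNat 0 filas rfl]

theorem a_eq_target (filas columnas : Int) :
    recorrido_diagonal_secundaria_inferior filas columnas = pvTarget filas columnas := by
  unfold recorrido_diagonal_secundaria_inferior pvTarget
  refine (PySem.List.foldl_congr_mem _ _
      (fun ruta s => ruta ++ pvDiag filas columnas s)
      _ (fun acc s _ => inner_loop_eq filas columnas s acc)).trans ?_
  rw [PySem.List.foldl_append_eq_flatMap]
  simp

theorem mem_target (filas columnas : Int) (p : Int × Int) :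
    p ∈ pvTarget filas columnas ↔
      (0 ≤ p.1 ∧ p.1 < filas ∧ 0 ≤ p.2 ∧ p.2 < columnas ∧ columnas - 1 ≤ p.1 + p.2) := by
  simp only [pvTarget, pvDiag, List.mem_flatMap, List.mem_map, PySem.List.mem_pyRange_one]
  constructor
  · rintro ⟨s, hs, f, hf, rfl⟩
    simp only
    omega
  · rintro ⟨h1, h2, h3, h4, h5⟩
    exact ⟨p.1 + p.2, by omega, p.1, by omega, by simp⟩

theorem mem_cells (filas columnas : Int) (p : Int × Int) :
    p ∈ pvCells filas columnas ↔
      (0 ≤ p.1 ∧ p.1 < filas ∧ 0 ≤ p.2 ∧ p.2 < columnas ∧ columnas - 1 ≤ p.1 + p.2) := by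
  simp only [pvCells, List.mem_flatMap, List.mem_map, PySem.List.mem_pyRange_one]
  constructor
  · rintro ⟨f, hf, c, hc, rfl⟩
    simp only
    omega
  · rintro ⟨h1, h2, h3, h4, h5⟩
    exact ⟨p.1, by omega, p.2, by omega, by simp⟩

theorem target_pairwise (filas columnas : Int) :
    (pvTarget filas columnas).Pairwise
      (fun a b => pvKey (max filas 1) a < pvKey (max filas 1) b) := by
  set M := max filas 1 with hM
  have hM0 : (0:Int) < M := by omega
  unfold pvTarget
  rw [List.pairwise_flatMap]
  constructor
  · intro s _
    unfold pvDiag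
    refine List.Pairwise.map _ ?_ (PySem.List.pairwise_lt_pyRange_one _ _)
    intro f g hfg
    simp only [pvKey]
    have e1 : (f + (s - f)) * M + f = s * M + f := by ring
    have e2 : (g + (s - g)) * M + g = s * M + g := by ring
    rw [e1, e2]
    omega
  · refine (PySem.List.pairwise_lt_pyRange_one _ _).imp_of_mem ?_
    intro s1 s2 hs1 hs2 hlt x hx y hy
    unfold pvDiag at hx hy
    simp only [List.mem_map, PySem.List.mem_pyRange_one] at hx hy
    obtain ⟨f1, hf1, rfl⟩ := hx
    obtain ⟨f2, hf2, rfl⟩ := hy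
    simp only [pvKey]
    have e1 : (f1 + (s1 - f1)) * M + f1 = s1 * M + f1 := by ring
    have e2 : (f2 + (s2 - f2)) * M + f2 = s2 * M + f2 := by ring
    rw [e1, e2, pv_base_lt_iff _ _ _ _ _ hM0 (by omega) (by omega) (by omega) (by omega)]
    exact Or.inl hlt

theorem cells_pairwise (filas columnas : Int) :
    (pvCells filas columnas).Pairwise
      (fun a b => pvKeyRow (max columnas 1) a < pvKeyRow (max columnas 1) b) := by
  set M := max columnas 1 with hM
  have hM0 : (0:Int) < M := by omega
  unfold pvCells
  rw [List.pairwise_flatMap]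
  constructor
  · intro f _
    refine List.Pairwise.map _ ?_ (PySem.List.pairwise_lt_pyRange_one _ _)
    intro c d hcd
    simp only [pvKeyRow]
    omega
  · refine (PySem.List.pairwise_lt_pyRange_one _ _).imp_of_mem ?_
    intro f1 f2 hf1 hf2 hlt x hx y hy
    simp only [List.mem_map, PySem.List.mem_pyRange_one] at hx hy
    obtain ⟨c1, hc1, rfl⟩ := hx
    obtain ⟨c2, hc2, rfl⟩ := hy
    simp only [pvKeyRow]
    rw [pv_base_lt_iff _ _ _ _ _ hM0 (by omega) (by omega) (by omega) (by omega)]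
    exact Or.inl hlt

theorem pairwise_lt_nodup {α : Type} (key : α → Int) (l : List α)
    (h : l.Pairwise (fun a b => key a < key b)) : l.Nodup :=
  h.imp (fun hab => by intro h; subst h; omega)

theorem target_perm_cells (filas columnas : Int) :
    (pvTarget filas columnas).Perm (pvCells filas columnas) := by
  rw [List.perm_ext_iff_of_nodup
      (pairwise_lt_nodup (pvKey (max filas 1)) _ (target_pairwise filas columnas))
      (pairwise_lt_nodup (pvKeyRow (max columnas 1)) _ (cells_pairwise filas columnas))]
  intro p
  rw [mem_target, mem_cells]

/-- insertBy only looks at `before` on (x, element of acc). -/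
theorem insertBy_congr {α : Type} (b1 b2 : α → α → Bool) (x : α) :
    ∀ (acc : List α), (∀ y ∈ acc, b1 x y = b2 x y) →
      PySem.List.insertBy b1 x acc = PySem.List.insertBy b2 x acc := by
  intro acc
  induction acc with
  | nil => intro _; rfl
  | cons y ys ih =>
      intro h
      simp only [PySem.List.insertBy]
      rw [h y (by simp)]
      by_cases hb : b2 x y = true
      · simp [hb]
      · simp only [hb, if_neg, Bool.not_eq_true]
        rw [ih (fun z hz => h z (by simp [hz]))]

theorem foldl_insertBy_congr {α : Type} (b1 b2 : α → α → Bool) (xs0 : List α)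
    (h : ∀ a ∈ xs0, ∀ b ∈ xs0, b1 a b = b2 a b) :
    ∀ (xs acc : List α), (∀ x ∈ xs, x ∈ xs0) → (∀ x ∈ acc, x ∈ xs0) →
      xs.foldl (fun acc x => PySem.List.insertBy b1 x acc) acc
        = xs.foldl (fun acc x => PySem.List.insertBy b2 x acc) acc := by
  intro xs
  induction xs with
  | nil => intro acc _ _; rfl
  | cons x xs ih =>
      intro acc hxs hacc
      simp only [List.foldl_cons]
      rw [insertBy_congr b1 b2 x acc
          (fun y hy => h x (hxs x (by simp)) y (hacc y hy))]
      refine ih _ (fun z hz => hxs z (by simp [hz])) ?_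
      intro z hz
      rw [PySem.List.mem_insertBy] at hz
      rcases hz with rfl | hz
      · exact hxs z (by simp)
      · exact hacc z hz

/-- On the cell region, the lexicographic (sum, row) comparison is the single-key comparison. -/
theorem lex_eq_key (filas columnas : Int) (a b : Int × Int)
    (ha : a ∈ pvCells filas columnas) (hb : b ∈ pvCells filas columnas) :
    ((decide (a.1 + a.2 < b.1 + b.2) || !decide (b.1 + b.2 < a.1 + a.2) && decide (a.1 < b.1)))
      = decide (pvKey (max filas 1) a < pvKey (max filas 1) b) := by
  rw [mem_cells] at ha hb
  set M := max filas 1 with hM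
  have hM0 : (0:Int) < M := by omega
  have : pvKey M a < pvKey M b ↔ (a.1 + a.2 < b.1 + b.2 ∨ (a.1 + a.2 = b.1 + b.2 ∧ a.1 < b.1)) := by
    simp only [pvKey]
    exact pv_base_lt_iff _ _ _ _ _ hM0 (by omega) (by omega) (by omega) (by omega)
  rcases Decidable.em (a.1 + a.2 < b.1 + b.2) with h | h
  · have hk : pvKey M a < pvKey M b := this.mpr (Or.inl h)
    simp [h, hk]
  · rcases Decidable.em (b.1 + b.2 < a.1 + a.2) with h2 | h2
    · have : ¬ pvKey M a < pvKey M b := by rw [this]; omega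
      simp [h, h2, this]
    · have heq : a.1 + a.2 = b.1 + b.2 := by omega
      by_cases h3 : a.1 < b.1
      · have : pvKey M a < pvKey M b := this.mpr (Or.inr ⟨heq, h3⟩)
        simp [h, h2, h3, this]
      · have : ¬ pvKey M a < pvKey M b := by rw [this]; omega
        simp [h, h2, h3, this]

theorem b_eq_sorted_key (filas columnas : Int) :
    recorrido_diagonal_secundaria_inferior_alt filas columnas
      = PySem.List.sorted (pvCells filas columnas) (pvKey (max filas 1)) false := by
  unfold recorrido_diagonal_secundaria_inferior_alt
  show (pvCells filas columnas).foldl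
      (fun acc x => PySem.List.insertBy
        (fun a b => decide (a.1 + a.2 < b.1 + b.2) || !decide (b.1 + b.2 < a.1 + a.2) && decide (a.1 < b.1)) x acc) []
    = _
  rw [PySem.List.sorted_eq_foldl_insertBy]
  exact foldl_insertBy_congr _ _ (pvCells filas columnas)
    (fun a ha b hb => lex_eq_key filas columnas a b ha hb)
    (pvCells filas columnas) [] (fun x hx => hx) (by simp)

-- ===== VERDICT (by name: the statement is the Claim_ definition above) =====
theorem recorrido_diagonal_secundaria_inferior_spec : Claim_equal_recorrido_diagonal_secundaria_inferior := by
  intro filas columnas _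
  unfold Spec_recorrido_diagonal_secundaria_inferior
  rw [a_eq_target, b_eq_sorted_key,
    PySem.List.sorted_eq_of_perm_of_pairwise_lt _ _ _
      (target_perm_cells filas columnas) (target_pairwise filas columnas)]
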